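-- pv_equiv track=rewrite | github.com/jpgazevedo/ML-for-RE-Class---Thesis | Python Scripts/finalClassificationNFile.py | removeRole
-- ===== SOURCE A (Python) =====
-- def removeRole(req):
--     if not(',' in req):
--         return req
--     else:
--         aux = req.split(',')
--         i=1
--         finalUS = ''
--         while i < len(aux):
--             if i==1:
--                 finalUS = finalUS + aux[i]
--             elif i==len(aux)-1:
--                 finalUS = finalUS + aux[i]
--             else:
--                 finalUS = finalUS + aux[i]
--             i=i+1
--         return finalUS
-- ===== SOURCE B (Python) =====
-- def removeRole(req):
--     if ',' not in req:
--         return req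
--     i = req.index(',')
--     return req[i + 1:].replace(',', '')
-- ===== Notes on version B (the rewrite author's own statement) =====
-- stated objective: simpler
-- what changed: B locates the first comma and strips the remaining commas from the tail slice instead of splitting into a parts list and rebuilding the string in an index-driven while loop.
import Mathlib
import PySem

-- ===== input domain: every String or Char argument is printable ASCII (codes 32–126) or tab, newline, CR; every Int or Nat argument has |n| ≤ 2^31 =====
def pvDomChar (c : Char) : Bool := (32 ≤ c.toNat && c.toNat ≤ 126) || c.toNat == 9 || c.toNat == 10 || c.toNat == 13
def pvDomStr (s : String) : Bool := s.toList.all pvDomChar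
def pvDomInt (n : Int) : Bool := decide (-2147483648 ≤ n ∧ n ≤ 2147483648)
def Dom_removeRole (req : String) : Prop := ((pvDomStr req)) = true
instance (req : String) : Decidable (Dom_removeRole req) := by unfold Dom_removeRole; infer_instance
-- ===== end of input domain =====

-- B finds the first comma and strips commas from the tail slice instead of splitting into a parts list and rebuilding in a while loop (simpler).


-- ===== PORT A =====
-- the while-loop: i starts at 1, appends aux[i] in each of the three (identical) branches
def removeRoleLoop (aux : List (List Char)) (i : Nat) (finalUS : List Char) : List Char :=
  if h : i < aux.length then
    if i == 1 then removeRoleLoop aux (i + 1) (finalUS ++ aux[i])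
    else if i == aux.length - 1 then removeRoleLoop aux (i + 1) (finalUS ++ aux[i])
    else removeRoleLoop aux (i + 1) (finalUS ++ aux[i])
  else finalUS
termination_by aux.length - i

def removeRole (req : String) : String :=
  if !(PySem.Str.isIn "," req) then req
  else
    let aux := PySem.Chars.splitOn req.toList ",".toList
    String.mk (removeRoleLoop aux 1 [])

-- ===== PORT B =====
def removeRole_alt (req : String) : String :=
  if !(PySem.Str.isIn "," req) then req
  else
    let i := PySem.Chars.find req.toList ",".toList   -- req.index(','), guarded to succeed
    String.mk (PySem.Chars.replace (PySem.List.slice req.toList (some (i + 1)) none) ",".toList [])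

-- ===== PRECONDITION & SPEC =====
def Spec_removeRole (req : String) (out : String) : Prop := out = removeRole_alt req
instance (req : String) (out : String) : Decidable (Spec_removeRole req out) := by unfold Spec_removeRole; infer_instance

-- ===== CLAIM (what is proved, stated in full; the proofs are below) =====
def Claim_equal_removeRole : Prop := ∀ (req : String), Dom_removeRole req → Spec_removeRole req (removeRole req)

-- ===== LEMMAS AND PROOFS =====

-- structural single-char split (proof-side model of Chars.splitOn on a one-char separator)
def mySplit (c : Char) : List Char → List (List Char)
  | [] => [[]]
  | x :: xs => if x = c then [] :: mySplit c xs
               else (x :: (mySplit c xs).headI) :: (mySplit c xs).tail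

theorem mySplit_ne_nil (c : Char) (l : List Char) : mySplit c l ≠ [] := by
  cases l with
  | nil => simp [mySplit]
  | cons x xs => simp only [mySplit]; split <;> simp

theorem mySplit_cons_self (c : Char) (l : List Char) :
    mySplit c l = (mySplit c l).headI :: (mySplit c l).tail := by
  cases h : mySplit c l with
  | nil => exact absurd h (mySplit_ne_nil c l)
  | cons p ps => simp

theorem splitOn_go_eq (c : Char) : ∀ (fuel : Nat) (l cur : List Char) (acc : List (List Char)),
    l.length < fuel →
    PySem.Chars.splitOn.go [c] fuel l cur acc =
      acc.reverse ++ (cur.reverse ++ (mySplit c l).headI) :: (mySplit c l).tail := by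
  intro fuel
  induction fuel with
  | zero => intro l cur acc h; omega
  | succ n ih =>
    intro l cur acc h
    cases l with
    | nil => simp [PySem.Chars.splitOn.go, mySplit]
    | cons x rest =>
      by_cases hx : x = c
      · subst hx
        have : PySem.Chars.splitOn.go [x] (n+1) (x :: rest) cur acc
             = PySem.Chars.splitOn.go [x] n rest [] (cur.reverse :: acc) := by
          simp [PySem.Chars.splitOn.go, List.isPrefixOf]
        rw [this, ih rest [] (cur.reverse :: acc) (by simpa using Nat.lt_of_succ_lt_succ h)]
        simp [mySplit]
        exact (mySplit_cons_self x rest).symm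
      · have : PySem.Chars.splitOn.go [c] (n+1) (x :: rest) cur acc
             = PySem.Chars.splitOn.go [c] n rest (x :: cur) acc := by
          simp [PySem.Chars.splitOn.go, List.isPrefixOf]
          intro hc; exact absurd hc.symm hx
        rw [this, ih rest (x :: cur) acc (by simpa using Nat.lt_of_succ_lt_succ h)]
        simp [mySplit, hx]
  
theorem splitOn_eq_mySplit (c : Char) (cs : List Char) :
    PySem.Chars.splitOn cs [c] = mySplit c cs := by
  unfold PySem.Chars.splitOn
  rw [splitOn_go_eq c (cs.length + 1) cs [] [] (by omega)]
  simpa using (mySplit_cons_self c cs).symm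

theorem replace_go_eq (c : Char) : ∀ (fuel : Nat) (l acc : List Char),
    l.length ≤ fuel →
    PySem.Chars.replace.go [c] [] fuel l acc = acc.reverse ++ l.filter (· ≠ c) := by
  intro fuel
  induction fuel with
  | zero =>
    intro l acc h
    have : l = [] := List.eq_nil_of_length_eq_zero (Nat.le_zero.mp h)
    subst this; simp [PySem.Chars.replace.go]
  | succ n ih =>
    intro l acc h
    cases l with
    | nil => simp [PySem.Chars.replace.go]
    | cons x rest =>
      by_cases hx : x = c
      · subst hx
        have : PySem.Chars.replace.go [x] [] (n+1) (x :: rest) acc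
             = PySem.Chars.replace.go [x] [] n rest acc := by
          simp [PySem.Chars.replace.go, List.isPrefixOf]
        rw [this, ih rest acc (by simpa using Nat.le_of_succ_le_succ h)]
        simp
      · have : PySem.Chars.replace.go [c] [] (n+1) (x :: rest) acc
             = PySem.Chars.replace.go [c] [] n rest (x :: acc) := by
          simp [PySem.Chars.replace.go, List.isPrefixOf]
          intro hc; exact absurd hc.symm hx
        rw [this, ih rest (x :: acc) (by simpa using Nat.le_of_succ_le_succ h)]
        simp [hx]

theorem replace_eq_filter (c : Char) (l : List Char) :
    PySem.Chars.replace l [c] [] = l.filter (· ≠ c) := by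
  unfold PySem.Chars.replace
  simp only [List.isEmpty_cons]
  exact replace_go_eq c l.length l [] le_rfl

theorem find_go_eq (c : Char) : ∀ (l : List Char) (k : Nat), c ∈ l →
    PySem.Chars.find.go [c] l k = (k : Int) + l.idxOf c := by
  intro l
  induction l with
  | nil => intro k h; simp at h
  | cons x rest ih =>
    intro k h
    by_cases hx : x = c
    · subst hx
      simp [PySem.Chars.find.go, List.isPrefixOf, List.idxOf_cons_self]
    · have hr : c ∈ rest := by
        rcases List.mem_cons.mp h with h1 | h1
        · exact absurd h1.symm hx
        · exact h1
      have : PySem.Chars.find.go [c] (x :: rest) k = PySem.Chars.find.go [c] rest (k + 1) := by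
        simp [PySem.Chars.find.go, List.isPrefixOf]
        intro hc; exact absurd hc.symm hx
      rw [this, ih (k + 1) hr]
      rw [List.idxOf_cons_ne _ (by simpa using hx)]
      push_cast; ring

theorem find_eq_idxOf (c : Char) (cs : List Char) (h : c ∈ cs) :
    PySem.Chars.find cs [c] = (cs.idxOf c : Int) := by
  unfold PySem.Chars.find
  simpa using find_go_eq c cs 0 h

theorem flatten_mySplit (c : Char) (l : List Char) :
    (mySplit c l).flatten = l.filter (· ≠ c) := by
  induction l with
  | nil => simp [mySplit]
  | cons x rest ih =>
    by_cases hx : x = c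
    · subst hx; simp [mySplit, ih]
    · simp only [mySplit, if_neg hx]
      rw [List.filter_cons_of_pos (by simpa using hx)]
      rw [← ih, (mySplit_cons_self c rest)]
      simp

theorem tail_mySplit_eq (c : Char) (cs : List Char) (h : c ∈ cs) :
    (mySplit c cs).tail.flatten = (cs.drop (cs.idxOf c + 1)).filter (· ≠ c) := by
  induction cs with
  | nil => simp at h
  | cons x rest ih =>
    by_cases hx : x = c
    · subst hx
      simp [mySplit, List.idxOf_cons_self, flatten_mySplit]
    · have hr : c ∈ rest := by
        rcases List.mem_cons.mp h with h1 | h1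
        · exact absurd h1.symm hx
        · exact h1
      simp only [mySplit, if_neg hx, List.tail_cons]
      rw [ih hr, List.idxOf_cons_ne _ (by simpa using hx)]
      simp

theorem removeRoleLoop_eq (aux : List (List Char)) : ∀ (i : Nat) (acc : List Char),
    removeRoleLoop aux i acc = acc ++ (aux.drop i).flatten := by
  intro i
  induction hn : aux.length - i using Nat.strong_induction_on generalizing i with
  | _ n ih =>
    intro acc
    unfold removeRoleLoop
    by_cases h : i < aux.length
    · have hd : aux.drop i = aux[i] :: aux.drop (i + 1) := List.drop_eq_getElem_cons h
      have hrec : removeRoleLoop aux (i + 1) (acc ++ aux[i])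
          = (acc ++ aux[i]) ++ (aux.drop (i + 1)).flatten :=
        ih (aux.length - (i + 1)) (by omega) (i + 1) rfl (acc ++ aux[i])
      simp only [h, dif_pos]
      have key : aux[i] ++ (List.drop (i + 1) aux).flatten = (List.drop i aux).flatten := by
        conv_rhs => rw [hd]
        simp only [List.flatten_cons]
      split_ifs <;> rw [hrec, ← key, List.append_assoc]
    · have : aux.drop i = [] := List.drop_eq_nil_of_le (by omega)
      simp [h, this]

theorem isIn_comma_iff (cs : List Char) : PySem.Chars.isIn [','] cs = true ↔ ',' ∈ cs := by
  rw [PySem.Chars.isIn_iff_infix]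
  exact List.singleton_infix_iff ',' cs

-- ===== VERDICT (by name: the statement is the Claim_ definition above) =====
theorem removeRole_spec : Claim_equal_removeRole := by
  unfold Claim_equal_removeRole
  intro req _
  unfold Spec_removeRole removeRole removeRole_alt
  by_cases hin : PySem.Str.isIn "," req = true
  · have hmem : ',' ∈ req.toList := by
      rw [← isIn_comma_iff]
      simpa using hin
    simp only [hin, Bool.not_true]
    have hsplit := splitOn_eq_mySplit ',' req.toList
    have hfind := find_eq_idxOf ',' req.toList hmem
    have hidx : req.toList.idxOf ',' < req.toList.length := List.idxOf_lt_length_of_mem hmem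
    rw [removeRoleLoop_eq]
    simp only [List.nil_append]
    have h1 : (",".toList : List Char) = [','] := rfl
    rw [h1, hsplit, hfind]
    have h2 : ((req.toList.idxOf ',' : Int) + 1) = ((req.toList.idxOf ',' + 1 : Nat) : Int) := by
      push_cast; ring
    rw [h2, PySem.List.slice_from _ (by positivity)]
    rw [Int.toNat_natCast]
    rw [replace_eq_filter]
    rw [List.drop_one, tail_mySplit_eq ',' req.toList hmem]
  · have hin' : PySem.Chars.isIn [','] req.toList = false := by
      have := Bool.not_eq_true _ ▸ hin
      simpa [PySem.Str.isIn] using eq_false_of_ne_true hin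
    simp [hin']
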